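-- pv_equiv track=rewrite | github.com/minaver/Algorithm_C | String/BJ_4659.py | check_accpetable
-- ===== SOURCE A (Python) =====
-- vowel = ['a','e','i','o','u']
--
-- def check_accpetable(word):
--   vowel_exist = False # 모음 개수
--
--   # 1. 모음 포함 여부 check
--   for w in word:
--     if w in vowel:
--       vowel_exist = True
--
--   if vowel_exist == False:
--     return False
--
--   for i in range(len(word)-1):
--     # 2. 같은 글자가 연속적으로 두번 등장하는지 check(ee, oo 제외)
--     if word[i] == word[i+1] and word[i] != 'e' and word[i] != 'o':
--       return False
--
--   for i in range(len(word)-2):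
--     # 3. 모음 3개나 자음 3개가 연달아 count 되는지 확인
--     if word[i] in vowel and word[i+1] in vowel and word[i+2] in vowel:  # 모음 3개가 연달아 나오는 경우
--       return False
--     elif not word[i] in vowel and not word[i+1] in vowel and not word[i+2] in vowel:  # 자음 3개가 연달아 나오는 경우
--       return False
--
--   return True
-- ===== SOURCE B (Python) =====
-- def check_accpetable(word):
--     vowels = "aeiou"
--     vowel_exist = False
--     prev2 = prev = None
--     for c in word:
--         is_v = c in vowels
--         vowel_exist = vowel_exist or is_v
--         if prev == c and c != 'e' and c != 'o':
--             return False
--         if prev2 is not None and (prev2 in vowels) == (prev in vowels) == is_v: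
--             return False
--         prev2, prev = prev, c
--     return vowel_exist
-- ===== Notes on version B (the rewrite author's own statement) =====
-- stated objective: alternative
-- what changed: Replaces A's three sequential scans (full vowel scan, adjacent-pair index loop, triple index loop) with one windowed pass that maintains the previous two characters and a vowel flag and returns False at the first violation.
import Mathlib
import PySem

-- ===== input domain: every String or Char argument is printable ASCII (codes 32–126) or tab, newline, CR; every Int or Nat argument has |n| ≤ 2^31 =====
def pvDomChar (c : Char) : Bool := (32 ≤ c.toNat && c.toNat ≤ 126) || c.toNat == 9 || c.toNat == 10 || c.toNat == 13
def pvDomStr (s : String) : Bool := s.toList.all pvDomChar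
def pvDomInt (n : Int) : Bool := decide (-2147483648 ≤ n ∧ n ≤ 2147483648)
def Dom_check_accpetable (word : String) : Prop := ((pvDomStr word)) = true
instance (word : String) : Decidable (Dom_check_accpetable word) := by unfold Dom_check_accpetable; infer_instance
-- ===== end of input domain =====

-- B replaces A's three sequential scans with one windowed pass (prev2/prev/current plus a vowel flag); same return value everywhere.

-- ===== PORT A =====
-- module-level constant: vowel = ['a','e','i','o','u']
def vowelList : List Char := ['a', 'e', 'i', 'o', 'u']

-- 'w in vowel'
def memVowel (w : Char) : Bool := vowelList.contains w

-- second loop: 'for i in range(len(word)-1): if word[i] == word[i+1] and word[i] != 'e' and word[i] != 'o': return False';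
-- i and i+1 are always in range here, so Python's word[i] is exactly cs[i]? = some _ and comparing the options is exact.
def aLoop2 (cs : List Char) (i : Nat) : Bool :=
  if i + 1 < cs.length then
    if (cs[i]? == cs[i + 1]?) && !(cs[i]? == some 'e') && !(cs[i]? == some 'o') then false
    else aLoop2 cs (i + 1)
  else true
termination_by cs.length - i

-- 'word[i] in vowel' lifted to the (always-some) option returned by cs[i]?
def memVowelO (o : Option Char) : Bool :=
  match o with
  | some c => memVowel c
  | none => false

-- third loop: three consecutive vowels / three consecutive consonants
def aLoop3 (cs : List Char) (i : Nat) : Bool :=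
  if i + 2 < cs.length then
    if memVowelO cs[i]? && memVowelO cs[i + 1]? && memVowelO cs[i + 2]? then false
    else if !(memVowelO cs[i]?) && !(memVowelO cs[i + 1]?) && !(memVowelO cs[i + 2]?) then false
    else aLoop3 cs (i + 1)
  else true
termination_by cs.length - i

def check_accpetable (word : String) : Bool :=
  let cs := word.toList
  -- 1. vowel scan
  let vowel_exist := cs.foldl (fun b w => if memVowel w then true else b) false
  if vowel_exist = false then false
  else aLoop2 cs 0 && aLoop3 cs 0   -- early 'return False' in either loop = short-circuiting &&

-- ===== PORT B =====
-- single windowed pass; state = (vowel_exist, prev2, prev)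
def bLoop (cs : List Char) (vexist : Bool) (prev2 prev : Option Char) : Bool :=
  match cs with
  | [] => vexist
  | c :: rest =>
    let isV := memVowel c
    let vexist := vexist || isV
    if prev == some c && !(c == 'e') && !(c == 'o') then false
    else
      match prev2, prev with
      | some p2, some p1 =>
        if (memVowel p2 == memVowel p1) && (memVowel p1 == isV) then false
        else bLoop rest vexist prev (some c)
      | _, _ => bLoop rest vexist prev (some c)

def check_accpetable_alt (word : String) : Bool :=
  bLoop word.toList false none none

-- ===== PRECONDITION & SPEC =====
def Spec_check_accpetable (word : String) (out : Bool) : Prop := out = check_accpetable_alt word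
instance (word : String) (out : Bool) : Decidable (Spec_check_accpetable word out) := by unfold Spec_check_accpetable; infer_instance

-- ===== CLAIM (what is proved, stated in full; the proofs are below) =====
def Claim_equal_check_accpetable : Prop := ∀ (word : String), Dom_check_accpetable word → Spec_check_accpetable word (check_accpetable word)

-- ===== LEMMAS AND PROOFS =====

-- common characterisations of the three rules
def hasV (cs : List Char) : Bool := cs.any memVowel

def okDup : List Char → Bool
  | a :: b :: rest =>
    if (a == b) && !(a == 'e') && !(a == 'o') then false else okDup (b :: rest)
  | _ => true

def okTri : List Char → Bool
  | a :: b :: c :: rest =>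
    if (memVowel a == memVowel b) && (memVowel b == memVowel c) then false
    else okTri (b :: c :: rest)
  | _ => true

lemma foldl_vexist (cs : List Char) (b : Bool) :
    cs.foldl (fun b w => if memVowel w then true else b) b = (b || cs.any memVowel) := by
  induction cs generalizing b with
  | nil => simp
  | cons a t ih =>
    simp only [List.foldl, List.any_cons]
    by_cases h : memVowel a
    · simp only [h, if_pos, ih]; simp
    · simp only [h]
      rw [if_neg (by simp [h]), ih]
      simp [h]

lemma aLoop2_drop (cs : List Char) (i : Nat) : aLoop2 cs i = okDup (cs.drop i) := by
  fun_induction aLoop2 cs i with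
  | case1 i h h2 =>
    have hi : i < cs.length := by omega
    have hi1 : i + 1 < cs.length := by omega
    rw [List.drop_eq_getElem_cons hi, List.drop_eq_getElem_cons hi1] at *
    simp only [List.getElem?_eq_getElem hi, List.getElem?_eq_getElem hi1] at h2
    simp only [Option.some_beq_some] at h2
    simp [okDup, h2]
  | case2 i h h2 ih =>
    have hi : i < cs.length := by omega
    have hi1 : i + 1 < cs.length := by omega
    rw [List.drop_eq_getElem_cons hi, List.drop_eq_getElem_cons hi1] at *
    simp only [List.getElem?_eq_getElem hi, List.getElem?_eq_getElem hi1] at h2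
    simp only [Option.some_beq_some] at h2
    simp only [okDup, ih]
    rw [if_neg h2]
  | case3 i h =>
    have hle : cs.length ≤ i + 1 := by omega
    match hd : cs.drop i with
    | [] => simp [okDup]
    | [a] => simp [okDup]
    | a :: b :: rest =>
      have h2 := List.length_drop (l := cs) (i := i)
      rw [hd] at h2
      simp at h2
      omega

lemma aLoop3_drop (cs : List Char) (i : Nat) : aLoop3 cs i = okTri (cs.drop i) := by
  fun_induction aLoop3 cs i with
  | case1 i h h2 =>
    have hi : i < cs.length := by omega
    have hi1 : i + 1 < cs.length := by omega
    have hi2 : i + 2 < cs.length := by omega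
    rw [List.drop_eq_getElem_cons hi, List.drop_eq_getElem_cons hi1, List.drop_eq_getElem_cons hi2]
    simp only [List.getElem?_eq_getElem hi, List.getElem?_eq_getElem hi1,
      List.getElem?_eq_getElem hi2, memVowelO] at h2
    simp only [okTri]
    rw [if_pos (by simp at h2 ⊢; simp [h2.1.1, h2.1.2, h2.2])]
  | case2 i h h2 h3 =>
    have hi : i < cs.length := by omega
    have hi1 : i + 1 < cs.length := by omega
    have hi2 : i + 2 < cs.length := by omega
    rw [List.drop_eq_getElem_cons hi, List.drop_eq_getElem_cons hi1, List.drop_eq_getElem_cons hi2]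
    simp only [List.getElem?_eq_getElem hi, List.getElem?_eq_getElem hi1,
      List.getElem?_eq_getElem hi2, memVowelO] at h3
    simp only [okTri]
    rw [if_pos ?_]
    simp at h3 ⊢
    simp [h3.1.1, h3.1.2, h3.2]
  | case3 i h h2 h3 ih =>
    have hi : i < cs.length := by omega
    have hi1 : i + 1 < cs.length := by omega
    have hi2 : i + 2 < cs.length := by omega
    rw [List.drop_eq_getElem_cons hi, List.drop_eq_getElem_cons hi1, List.drop_eq_getElem_cons hi2]
    rw [List.drop_eq_getElem_cons hi1, List.drop_eq_getElem_cons hi2] at ih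
    simp only [List.getElem?_eq_getElem hi, List.getElem?_eq_getElem hi1,
      List.getElem?_eq_getElem hi2, memVowelO] at h2 h3
    simp only [okTri, ih]
    rw [if_neg ?_]
    simp at h2 h3 ⊢
    cases hva : memVowel cs[i] <;> cases hvb : memVowel cs[i+1] <;> cases hvc : memVowel cs[i+2] <;>
      simp_all
  | case4 i h =>
    have hle : cs.length ≤ i + 2 := by omega
    match hd : cs.drop i with
    | [] => simp [okTri]
    | [a] => simp [okTri]
    | [a, b] => simp [okTri]
    | a :: b :: c :: rest =>
      have h2 := List.length_drop (l := cs) (i := i)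
      rw [hd] at h2
      simp at h2
      omega

lemma bLoop_two (cs : List Char) (v : Bool) (p2 p1 : Char) :
    bLoop cs v (some p2) (some p1) =
      if okDup (p1 :: cs) && okTri (p2 :: p1 :: cs) then (v || hasV cs) else false := by
  induction cs generalizing v p2 p1 with
  | nil => simp [bLoop, okDup, okTri, hasV]
  | cons c rest ih =>
    simp only [bLoop, ih, okDup, okTri, hasV, List.any_cons, Option.some_beq_some]
    by_cases hpc : p1 = c
    · subst hpc
      by_cases heo : ((p1 == p1) && !(p1 == 'e') && !(p1 == 'o')) = true
      · simp at heo
        simp [heo.1, heo.2]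
      · simp only [heo, if_neg, Bool.false_eq_true, not_false_eq_true, if_false]
        by_cases htri : ((memVowel p2 == memVowel p1) && (memVowel p1 == memVowel p1)) = true
        · simp at htri
          simp [htri]
        · simp only [htri, if_neg, Bool.false_eq_true, not_false_eq_true, if_false]
          by_cases hok : (okDup (p1 :: rest) && okTri (p1 :: p1 :: rest)) = true
          · simp only [hok, if_pos, Bool.or_assoc]
          · simp only [hok, if_neg, Bool.false_eq_true, not_false_eq_true, if_false]
    · have hA : ((p1 == c) && !(c == 'e') && !(c == 'o')) = false := by simp [hpc]
      have hB : ((p1 == c) && !(p1 == 'e') && !(p1 == 'o')) = false := by simp [hpc]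
      simp only [hA, hB, Bool.false_eq_true, if_false]
      by_cases htri : ((memVowel p2 == memVowel p1) && (memVowel p1 == memVowel c)) = true
      · simp at htri
        simp [htri.1, htri.2]
      · simp only [htri, if_neg, Bool.false_eq_true, not_false_eq_true, if_false]
        by_cases hok : (okDup (c :: rest) && okTri (p1 :: c :: rest)) = true
        · simp only [hok, if_pos, Bool.or_assoc]
        · simp only [hok, if_neg, Bool.false_eq_true, not_false_eq_true, if_false]

lemma bLoop_one (cs : List Char) (v : Bool) (p1 : Char) :
    bLoop cs v none (some p1) =
      if okDup (p1 :: cs) && okTri (p1 :: cs) then (v || hasV cs) else false := by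
  cases cs with
  | nil => simp [bLoop, okDup, okTri, hasV]
  | cons c rest =>
    simp only [bLoop, bLoop_two, okDup, okTri, hasV, List.any_cons, Option.some_beq_some]
    by_cases hpc : p1 = c
    · subst hpc
      by_cases heo : ((p1 == p1) && !(p1 == 'e') && !(p1 == 'o')) = true
      · simp at heo
        simp [heo.1, heo.2]
      · simp only [heo, if_neg, Bool.false_eq_true, not_false_eq_true, if_false]
        by_cases hok : (okDup (p1 :: rest) && okTri (p1 :: p1 :: rest)) = true
        · simp only [hok, if_pos, Bool.or_assoc]
        · simp only [hok, if_neg, Bool.false_eq_true, not_false_eq_true, if_false]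
    · have hA : ((p1 == c) && !(c == 'e') && !(c == 'o')) = false := by simp [hpc]
      have hB : ((p1 == c) && !(p1 == 'e') && !(p1 == 'o')) = false := by simp [hpc]
      simp only [hA, hB, Bool.false_eq_true, if_false]
      by_cases hok : (okDup (c :: rest) && okTri (p1 :: c :: rest)) = true
      · simp only [hok, if_pos, Bool.or_assoc]
      · simp only [hok, if_neg, Bool.false_eq_true, not_false_eq_true, if_false]

lemma bLoop_zero (cs : List Char) (v : Bool) :
    bLoop cs v none none =
      if okDup cs && okTri cs then (v || hasV cs) else false := by
  cases cs with
  | nil => simp [bLoop, okDup, okTri, hasV]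
  | cons c rest =>
    simp only [bLoop, bLoop_one, hasV, List.any_cons]
    by_cases hok : (okDup (c :: rest) && okTri (c :: rest)) = true
    · simp [hok, Bool.or_assoc]
    · simp [hok]

lemma check_eq_alt (word : String) : check_accpetable word = check_accpetable_alt word := by
  unfold check_accpetable check_accpetable_alt
  simp only [foldl_vexist, Bool.false_or, aLoop2_drop, aLoop3_drop, List.drop_zero, bLoop_zero]
  cases hv : hasV word.toList <;> cases hd : okDup word.toList <;> cases ht : okTri word.toList <;>
    simp_all [hasV]

-- ===== VERDICT (by name: the statement is the Claim_ definition above) =====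
theorem check_accpetable_spec : Claim_equal_check_accpetable := by
  intro word _
  unfold Spec_check_accpetable
  exact check_eq_alt word
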